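-- pv_equiv track=rewrite | github.com/ulises-jimenez07/coding_exercises | complete_data_structures/interview_questions/dictionaries/same_frequency.py | check_same_frequency
-- ===== SOURCE A (Python) =====
-- def check_same_frequency(list1, list2):
--     # TODO
--     freq = {}
--     for item in list1:
--         freq[item] = freq.get(item, 0) + 1
--
--     for item in list2:
--         freq[item] = freq.get(item, 0) - 1
--         if freq[item] < 0:
--             return False
--
--     return True
-- ===== SOURCE B (Python) =====
-- def check_same_frequency(list1, list2):
--     return all(list2.count(item) <= list1.count(item) for item in set(list2))
-- ===== Notes on version B (the rewrite author's own statement) =====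
-- stated objective: idiomatic
-- what changed: Replaces A's mutable frequency dict with decrement-and-early-exit by a direct containment check: for every distinct element of list2, its count in list2 must not exceed its count in list1.
import Mathlib
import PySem

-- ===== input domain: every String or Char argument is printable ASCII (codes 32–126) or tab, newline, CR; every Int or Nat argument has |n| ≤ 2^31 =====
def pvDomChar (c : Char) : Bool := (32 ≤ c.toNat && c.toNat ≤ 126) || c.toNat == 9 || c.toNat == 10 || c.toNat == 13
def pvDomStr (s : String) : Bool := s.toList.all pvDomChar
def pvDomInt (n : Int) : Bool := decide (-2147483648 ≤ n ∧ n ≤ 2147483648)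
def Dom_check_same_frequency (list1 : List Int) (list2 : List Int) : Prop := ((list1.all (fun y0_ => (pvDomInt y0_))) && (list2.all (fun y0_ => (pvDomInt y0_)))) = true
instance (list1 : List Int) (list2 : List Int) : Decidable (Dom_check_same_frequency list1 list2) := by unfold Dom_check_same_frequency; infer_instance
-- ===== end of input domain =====

-- B (idiomatic): replaces A's dict build + decrement-with-early-exit by a direct per-distinct-element count containment check; same cost class, no speed claim.


-- ===== PORT A =====
-- loop over list2: decrement the dict count, return False as soon as one goes negative
def csfLoop (freq : PySem.Dict Int Int) (l : List Int) : Bool :=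
  match l with
  | [] => true
  | item :: rest =>
    let freq' := freq.insert item (freq.getD item 0 - 1)
    if freq'.getD item 0 < 0 then false else csfLoop freq' rest

def check_same_frequency (list1 : List Int) (list2 : List Int) : Bool :=
  let freq := list1.foldl (fun d item => d.insert item (d.getD item 0 + 1)) PySem.Dict.empty
  csfLoop freq list2

-- ===== PORT B =====
def check_same_frequency_alt (list1 : List Int) (list2 : List Int) : Bool :=
  (PySem.Set.ofList list2).all (fun item => list2.count item ≤ list1.count item)

-- ===== PRECONDITION & SPEC =====
def Spec_check_same_frequency (list1 : List Int) (list2 : List Int) (out : Bool) : Prop := out = check_same_frequency_alt list1 list2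
instance (list1 : List Int) (list2 : List Int) (out : Bool) : Decidable (Spec_check_same_frequency list1 list2 out) := by unfold Spec_check_same_frequency; infer_instance

-- ===== CLAIM (what is proved, stated in full; the proofs are below) =====
def Claim_equal_check_same_frequency : Prop := ∀ (list1 : List Int) (list2 : List Int), Dom_check_same_frequency list1 list2 → Spec_check_same_frequency list1 list2 (check_same_frequency list1 list2)

-- ===== LEMMAS AND PROOFS =====

lemma csfLoop_spec (l : List Int) (d : PySem.Dict Int Int) :
    csfLoop d l = decide (∀ x ∈ l, (l.count x : Int) ≤ d.getD x 0) := by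
  induction l generalizing d with
  | nil => simp [csfLoop]
  | cons a rest ih =>
    simp only [csfLoop, PySem.Dict.getD_insert_self]
    by_cases h : d.getD a 0 - 1 < 0
    · simp only [if_pos h]
      symm
      simp only [decide_eq_false_iff_not, not_forall]
      refine ⟨a, by simp, ?_⟩
      simp only [List.count_cons_self]
      push_cast
      omega
    · simp only [if_neg h, ih]
      congr 1
      apply propext
      constructor
      · intro hrest x hx
        rcases List.mem_cons.mp hx with rfl | hx'
        · by_cases hmem : x ∈ rest
          · have := hrest x hmem
            simp only [PySem.Dict.getD_insert] at this
            rw [List.count_cons_self]; push_cast at this ⊢; omega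
          · rw [List.count_cons_self, List.count_eq_zero_of_not_mem hmem]; push_cast; omega
        · have := hrest x hx'
          simp only [PySem.Dict.getD_insert] at this
          by_cases hxa : x = a
          · subst hxa
            rw [if_pos rfl] at this
            rw [List.count_cons_self]; push_cast at this ⊢; omega
          · rw [if_neg hxa] at this
            simp only [List.count_cons, beq_iff_eq, if_neg (Ne.symm hxa)]
            omega
      · intro hall x hx
        simp only [PySem.Dict.getD_insert]
        by_cases hxa : x = a
        · subst hxa
          rw [if_pos rfl]
          have := hall x (by simp)
          rw [List.count_cons_self] at this; push_cast at this ⊢; omega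
        · rw [if_neg hxa]
          have := hall x (List.mem_cons_of_mem _ hx)
          simp only [List.count_cons, beq_iff_eq, if_neg (Ne.symm hxa)] at this
          omega

-- ===== VERDICT (by name: the statement is the Claim_ definition above) =====
theorem check_same_frequency_spec : Claim_equal_check_same_frequency := by
  intro list1 list2 _
  unfold Spec_check_same_frequency check_same_frequency check_same_frequency_alt
  rw [csfLoop_spec]
  simp only [PySem.Dict.getD_foldl_insert_add_one, PySem.Dict.getD_empty, zero_add]
  rw [Bool.eq_iff_iff]
  simp [PySem.Set.mem_ofList, Nat.cast_le]
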